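-- pv_equiv track=rewrite | github.com/otonashi-labs/vanity-selector | selector_v2/vanity_selector_v2.py | generate_random_string
-- ===== SOURCE A (Python) =====
-- def lcg_rand(seed, process_seed):
--     seed = int(seed)
--     seed = (seed * process_seed * 6364136223846793005 + 1) & 0xffffffffffffffff  # 64-bit modulus
--     return seed
--
-- def rand_mod(seed, process_seed, mod):
--     seed = lcg_rand(seed, process_seed)
--     return seed % mod, seed
--
-- def generate_random_string(gid, string_len, process_seed):
--     seed = gid
--     random_string = ''
--     charset = "0123456789ABCDEFGHIJKLMNOPQRSTUVWXYZabcdefghijklmnopqrstuvwxyz"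
--     for _ in range(string_len):
--         rand_num, seed = rand_mod(seed, process_seed, 62)
--         random_string += charset[rand_num]
--     return random_string
-- ===== SOURCE B (Python) =====
-- def generate_random_string(gid, string_len, process_seed):
--     charset = "0123456789ABCDEFGHIJKLMNOPQRSTUVWXYZabcdefghijklmnopqrstuvwxyz"
--     M = 1 << 64
--     a = (process_seed * 6364136223846793005) % M
--
--     def affine_pow(n):
--         # binary exponentiation of the affine step x -> (a*x + 1) % M: jump n steps at once
--         A, B = 1, 0
--         pA, pB = a, 1
--         while n:
--             if n % 2 == 1:
--                 A, B = (pA * A) % M, (pA * B + pB) % M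
--             pA, pB = (pA * pA) % M, (pA * pB + pB) % M
--             n //= 2
--         return A, B
--
--     def gen(s, n):
--         # divide and conquer: left half from s, right half from the jumped-ahead seed
--         if n <= 0:
--             return ''
--         if n == 1:
--             return charset[((a * s + 1) % M) % 62]
--         h = n // 2
--         A, B = affine_pow(h)
--         return gen(s, h) + gen((A * s + B) % M, n - h)
--
--     return gen(gid % M, string_len)
-- ===== Notes on version B (the rewrite author's own statement) =====
-- stated objective: alternative
-- what changed: Replaces A's sequential per-character LCG loop with divide-and-conquer: binary exponentiation of the affine step map (LCG jump-ahead) computes the midpoint seed, and the two halves of the string are generated recursively and concatenated.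
import Mathlib
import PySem

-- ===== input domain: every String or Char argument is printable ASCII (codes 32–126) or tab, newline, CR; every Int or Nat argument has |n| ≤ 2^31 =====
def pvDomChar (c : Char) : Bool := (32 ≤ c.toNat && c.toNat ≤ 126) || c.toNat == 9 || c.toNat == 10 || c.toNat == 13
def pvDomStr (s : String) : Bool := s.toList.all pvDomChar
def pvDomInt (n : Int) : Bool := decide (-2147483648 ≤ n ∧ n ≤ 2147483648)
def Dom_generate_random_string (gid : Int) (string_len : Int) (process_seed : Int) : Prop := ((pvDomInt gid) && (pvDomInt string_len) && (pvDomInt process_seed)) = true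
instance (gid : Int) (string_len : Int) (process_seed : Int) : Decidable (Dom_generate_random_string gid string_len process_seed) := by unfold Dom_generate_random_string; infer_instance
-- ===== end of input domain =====

-- B replaces A's sequential per-character LCG loop by divide-and-conquer: binary exponentiation
-- of the affine step map jumps the seed to the midpoint, and each half is generated recursively.


-- ===== PORT A =====
-- seed = (seed * process_seed * 6364136223846793005 + 1) & 0xffffffffffffffff
def lcg_rand (seed : Int) (process_seed : Int) : Int :=
  PySem.Int.band (seed * process_seed * 6364136223846793005 + 1) 18446744073709551615

def rand_mod (seed : Int) (process_seed : Int) (m : Int) : Int × Int :=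
  let seed' := lcg_rand seed process_seed
  (PySem.Int.mod seed' m, seed')

-- charset[rand_num]: rand_num = seed % 62 is always in [0, 62) = range of the 62-char charset, so the default is never used
def generate_random_string (gid : Int) (string_len : Int) (process_seed : Int) : String :=
  let charset := "0123456789ABCDEFGHIJKLMNOPQRSTUVWXYZabcdefghijklmnopqrstuvwxyz".toList
  let st := (PySem.List.pyRange 0 string_len 1).foldl
    (fun (st : Int × List Char) _ =>
      let rs := rand_mod st.1 process_seed 62
      (rs.2, st.2 ++ [PySem.List.pyGetD charset rs.1 ' ']))
    (gid, [])
  String.mk st.2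

-- ===== PORT B =====
-- M = 1 << 64
def grsM : Int := 18446744073709551616

-- affine_pow of Source B: binary exponentiation of the affine map x -> (a*x+1) % M.
-- Source B only ever calls it with n >= 1 (python's `while n:` would diverge for n < 0);
-- the `n ≤ 0` guard merely totalizes the port.
def grsAffinePow (A : Int) (B : Int) (pA : Int) (pB : Int) (n : Int) : Int × Int :=
  if h : n ≤ 0 then (A, B)
  else
    let A' := if PySem.Int.mod n 2 = 1 then PySem.Int.mod (pA * A) grsM else A
    let B' := if PySem.Int.mod n 2 = 1 then PySem.Int.mod (pA * B + pB) grsM else B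
    grsAffinePow A' B' (PySem.Int.mod (pA * pA) grsM) (PySem.Int.mod (pA * pB + pB) grsM)
      (PySem.Int.floordiv n 2)
termination_by n.toNat
decreasing_by
  rw [PySem.Int.floordiv_eq_ediv_of_pos (by omega)]
  omega

-- gen of Source B: charset[t % 62] is always in range, so the default is never used
def grsGen (a : Int) (charset : List Char) (s : Int) (n : Int) : List Char :=
  if h0 : n ≤ 0 then []
  else if h1 : n = 1 then
    [PySem.List.pyGetD charset (PySem.Int.mod (PySem.Int.mod (a * s + 1) grsM) 62) ' ']
  else
    let hlf := PySem.Int.floordiv n 2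
    let P := grsAffinePow 1 0 a 1 hlf
    grsGen a charset s hlf ++ grsGen a charset (PySem.Int.mod (P.1 * s + P.2) grsM) (n - hlf)
termination_by n.toNat
decreasing_by
  · rw [PySem.Int.floordiv_eq_ediv_of_pos (by omega)]; omega
  · rw [PySem.Int.floordiv_eq_ediv_of_pos (by omega)]; omega

def generate_random_string_alt (gid : Int) (string_len : Int) (process_seed : Int) : String :=
  let charset := "0123456789ABCDEFGHIJKLMNOPQRSTUVWXYZabcdefghijklmnopqrstuvwxyz".toList
  let a := PySem.Int.mod (process_seed * 6364136223846793005) grsM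
  String.mk (grsGen a charset (PySem.Int.mod gid grsM) string_len)

-- ===== PRECONDITION & SPEC =====
def Spec_generate_random_string (gid : Int) (string_len : Int) (process_seed : Int) (out : String) : Prop := out = generate_random_string_alt gid string_len process_seed
instance (gid : Int) (string_len : Int) (process_seed : Int) (out : String) : Decidable (Spec_generate_random_string gid string_len process_seed out) := by unfold Spec_generate_random_string; infer_instance

-- ===== CLAIM (what is proved, stated in full; the proofs are below) =====
def Claim_equal_generate_random_string : Prop := ∀ (gid : Int) (string_len : Int) (process_seed : Int), Dom_generate_random_string gid string_len process_seed → Spec_generate_random_string gid string_len process_seed (generate_random_string gid string_len process_seed)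

-- ===== LEMMAS AND PROOFS =====

-- the one-step LCG update, as a plain emod
def grsF (a : Int) (s : Int) : Int := (a * s + 1) % grsM

-- the seed chain: the n seeds the LCG emits starting from s
def grsChainE (a : Int) (s : Int) : Nat → List Int
  | 0 => []
  | k + 1 => grsF a s :: grsChainE a (grsF a s) k

def grsCharF (cs : List Char) (t : Int) : Char := PySem.List.pyGetD cs (PySem.Int.mod t 62) ' '

-- Python's `x & 0xffffffffffffffff` is `x % 2**64`
theorem grs_band_mask (a : Int) : PySem.Int.band a 18446744073709551615 = a % grsM := by
  unfold grsM PySem.Int.band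
  by_cases h : 0 ≤ a
  · rw [if_pos h]
    have h1 : a.toNat &&& (18446744073709551615:Int).toNat = a.toNat % 2^64 := by
      simpa using Nat.and_two_pow_sub_one_eq_mod a.toNat 64
    rw [h1]
    have h2 : ((a.toNat % 2^64 : Nat) : Int) = (a.toNat : Int) % 2^64 := by push_cast; ring_nf
    omega
  · rw [if_neg h]
    have h1 : (18446744073709551615:Int).toNat &&& (-a-1).toNat = (-a-1).toNat % 2^64 := by
      have := Nat.and_two_pow_sub_one_eq_mod (-a-1).toNat 64
      rw [Nat.and_comm] at this
      simpa using this
    rw [h1]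
    have h2 : (((-a-1).toNat % 2^64 : Nat) : Int) = ((-a-1).toNat : Int) % 2^64 := by push_cast; ring_nf
    have h3 : ((-a-1).toNat : Int) = -a-1 := by omega
    have hb1 : 0 ≤ (-a-1) % (2^64:Int) := Int.emod_nonneg _ (by norm_num)
    have hb2 : (-a-1) % (2^64:Int) < 2^64 := Int.emod_lt_of_pos _ (by norm_num)
    have hb3 : 0 ≤ a % (2^64:Int) := Int.emod_nonneg _ (by norm_num)
    have hb4 : a % (2^64:Int) < 2^64 := Int.emod_lt_of_pos _ (by norm_num)
    omega

theorem grs_modM (x : Int) : PySem.Int.mod x grsM = x % grsM :=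
  PySem.Int.mod_eq_emod_of_pos (by unfold grsM; norm_num)

-- mod-absorption toolkit
theorem grs_absorb_left (x y z : Int) : ((x % grsM) * y + z) % grsM = (x * y + z) % grsM := by
  have h : x % grsM ≡ x [ZMOD grsM] := Int.emod_emod_of_dvd x dvd_rfl
  exact (h.mul_right y).add_right z

theorem grs_absorb_mid (x y z : Int) : (x * (y % grsM) + z) % grsM = (x * y + z) % grsM := by
  have h : y % grsM ≡ y [ZMOD grsM] := Int.emod_emod_of_dvd y dvd_rfl
  exact (h.mul_left x).add_right z

theorem grs_absorb_add (x z : Int) : (x + z % grsM) % grsM = (x + z) % grsM := by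
  have h : z % grsM ≡ z [ZMOD grsM] := Int.emod_emod_of_dvd z dvd_rfl
  exact h.add_left x

-- A's loop, run over any index list, appends exactly the characters of the seed chain
theorem grs_loop (p : Int) (cs : List Char) (l : List Int) :
    ∀ (s : Int) (acc : List Char),
    (l.foldl (fun (st : Int × List Char) _ =>
        let rs := rand_mod st.1 p 62
        (rs.2, st.2 ++ [PySem.List.pyGetD cs rs.1 ' '])) (s, acc)).2
      = acc ++ (grsChainE ((p * 6364136223846793005) % grsM) s l.length).map (grsCharF cs) := by
  induction l with
  | nil => intro s acc; simp [grsChainE]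
  | cons x xs ih =>
    intro s acc
    rw [List.foldl_cons]
    dsimp only
    rw [ih]
    have hstep : lcg_rand s p = grsF ((p * 6364136223846793005) % grsM) s := by
      unfold lcg_rand grsF
      rw [grs_band_mask, grs_absorb_left]
      ring_nf
    simp [grsChainE, rand_mod, hstep, grsCharF]

theorem grs_len (n : Int) : (PySem.List.pyRange 0 n 1).length = n.toNat := by
  rw [PySem.List.length_pyRange_one]; omega

-- squaring an affine map (mod M) is applying it twice
theorem grs_square (pA pB t : Int) :
    ((pA * pA) % grsM * t + (pA * pB + pB) % grsM) % grsM
      = (pA * ((pA * t + pB) % grsM) + pB) % grsM := by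
  rw [grs_absorb_mid, grs_absorb_left, grs_absorb_add]
  ring_nf

theorem grs_iterate_double (pA pB : Int) (m : Nat) (t : Int) :
    (fun u => ((pA * pA) % grsM * u + (pA * pB + pB) % grsM) % grsM)^[m] t
      = (fun u => (pA * u + pB) % grsM)^[2 * m] t := by
  induction m generalizing t with
  | zero => rfl
  | succ k ih =>
    rw [Function.iterate_succ_apply, ih, grs_square]
    have : 2 * (k + 1) = (2 * k) + 1 + 1 := by omega
    rw [this, Function.iterate_succ_apply, Function.iterate_succ_apply]

-- affine_pow computes the n-fold iterate of the pending map applied after the accumulated map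
theorem grs_affinePow_spec : ∀ (k : Nat) (n : Int), n.toNat = k → 0 ≤ n →
    ∀ (A B pA pB s : Int),
    ((grsAffinePow A B pA pB n).1 * s + (grsAffinePow A B pA pB n).2) % grsM
      = (fun u => (pA * u + pB) % grsM)^[n.toNat] ((A * s + B) % grsM) := by
  intro k
  induction k using Nat.strong_induction_on with
  | _ k ih =>
    intro n hk hn A B pA pB s
    unfold grsAffinePow
    by_cases h0 : n ≤ 0
    · rw [dif_pos h0]
      have : n = 0 := le_antisymm h0 hn
      subst this
      simp
    · rw [dif_neg h0]
      have hmod : PySem.Int.mod n 2 = n % 2 := PySem.Int.mod_eq_emod_of_pos (by omega)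
      have hdiv : PySem.Int.floordiv n 2 = n / 2 := PySem.Int.floordiv_eq_ediv_of_pos (by omega)
      dsimp only
      rw [hmod, hdiv]
      have hlt : (n / 2).toNat < k := by omega
      have ihh := ih _ hlt (n / 2) rfl (by omega)
      by_cases hodd : n % 2 = 1
      · rw [if_pos hodd, if_pos hodd, ihh]
        simp only [grs_modM]
        rw [grs_iterate_double]
        have harg : ((pA * A) % grsM * s + (pA * B + pB) % grsM) % grsM
            = (pA * ((A * s + B) % grsM) + pB) % grsM := by
          rw [grs_absorb_mid, grs_absorb_left, grs_absorb_add]; ring_nf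
        rw [harg, ← Function.iterate_succ_apply]
        congr 1
        omega
      · rw [if_neg hodd, if_neg hodd, ihh]
        simp only [grs_modM]
        rw [grs_iterate_double]
        have : 2 * (n / 2).toNat = n.toNat := by omega
        rw [this]

-- the chain splits at any midpoint, the right part starting from the iterated seed
theorem grs_chain_append (a : Int) (m : Nat) : ∀ (kk : Nat) (s : Int),
    grsChainE a s (m + kk) = grsChainE a s m ++ grsChainE a ((grsF a)^[m] s) kk := by
  induction m with
  | zero => intro kk s; simp [grsChainE]
  | succ j ih =>
    intro kk s
    have : j + 1 + kk = (j + kk) + 1 := by omega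
    rw [this]
    show grsF a s :: grsChainE a (grsF a s) (j + kk) = _
    rw [ih kk (grsF a s)]
    simp [grsChainE, Function.iterate_succ_apply]

theorem grs_f_mod (a s : Int) : grsF a (s % grsM) = grsF a s := by
  unfold grsF
  rw [grs_absorb_mid]

theorem grs_iter_f_mod (a : Int) (m : Nat) (hm : 1 ≤ m) (s : Int) :
    (grsF a)^[m] (s % grsM) = (grsF a)^[m] s := by
  obtain ⟨j, rfl⟩ : ∃ j, m = j + 1 := ⟨m - 1, by omega⟩
  rw [Function.iterate_succ_apply, Function.iterate_succ_apply, grs_f_mod]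

-- gen produces exactly the characters of the seed chain
theorem grs_gen_spec (a : Int) (cs : List Char) : ∀ (k : Nat) (n : Int), n.toNat = k →
    ∀ (s : Int), grsGen a cs s n = (grsChainE a s n.toNat).map (grsCharF cs) := by
  intro k
  induction k using Nat.strong_induction_on with
  | _ k ih =>
    intro n hk s
    unfold grsGen
    by_cases h0 : n ≤ 0
    · rw [dif_pos h0]
      have : n.toNat = 0 := by omega
      rw [this]; simp [grsChainE]
    · rw [dif_neg h0]
      by_cases h1 : n = 1
      · rw [dif_pos h1]
        subst h1
        show _ = (grsChainE a s 1).map (grsCharF cs)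
        simp [grsChainE, grsCharF, grsF, grs_modM]
      · rw [dif_neg h1]
        have hdiv : PySem.Int.floordiv n 2 = n / 2 := PySem.Int.floordiv_eq_ediv_of_pos (by omega)
        dsimp only
        rw [hdiv]
        have hh1 : 1 ≤ n / 2 := by omega
        have hlt1 : (n / 2).toNat < k := by omega
        have hlt2 : (n - n / 2).toNat < k := by omega
        rw [ih _ hlt1 (n / 2) rfl s, ih _ hlt2 (n - n / 2) rfl]
        have hjump : PySem.Int.mod ((grsAffinePow 1 0 a 1 (n / 2)).1 * s + (grsAffinePow 1 0 a 1 (n / 2)).2) grsM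
            = (grsF a)^[(n / 2).toNat] s := by
          rw [grs_modM]
          have := grs_affinePow_spec (n / 2).toNat (n / 2) rfl (by omega) 1 0 a 1 s
          rw [this]
          have hfn : (fun u => (a * u + 1) % grsM) = grsF a := by funext u; rfl
          rw [hfn]
          have : (1 * s + 0) % grsM = s % grsM := by ring_nf
          rw [this, grs_iter_f_mod a _ (by omega) s]
        rw [hjump]
        have hsplit : n.toNat = (n / 2).toNat + (n - n / 2).toNat := by omega
        rw [hsplit, grs_chain_append, List.map_append]

-- the chain from gid % M equals the chain from gid
theorem grs_chain_mod (a gid : Int) (m : Nat) :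
    grsChainE a (gid % grsM) m = grsChainE a gid m := by
  cases m with
  | zero => rfl
  | succ j => simp [grsChainE, grs_f_mod]

-- ===== VERDICT (by name: the statement is the Claim_ definition above) =====
theorem generate_random_string_spec : Claim_equal_generate_random_string := by
  intro gid string_len process_seed _
  unfold Spec_generate_random_string generate_random_string generate_random_string_alt
  dsimp only
  rw [grs_loop process_seed _ (PySem.List.pyRange 0 string_len 1) gid [], grs_len]
  rw [grs_gen_spec _ _ string_len.toNat string_len rfl, grs_modM, grs_modM, grs_chain_mod]
  simp
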